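-- pv_equiv track=rewrite | github.com/evaarakchieva/yandexTraining4 | yandexContest/workout 4/hashes/string_base.py | find_original_length_with_z_func
-- ===== SOURCE A (Python) =====
-- def find_original_length_with_z_func(input_string):
--     n = len(input_string)
--     z = [0] * n
--     l, r = 0, 0
--     original_string_length = n
--     maximum_value = 0
--     for i in range(1, n):
--         if i <= r:
--             z[i] = min(r - i + 1, z[i - l])
--         while i + z[i] < n and input_string[z[i]] == input_string[i + z[i]]:
--             z[i] += 1
--         if i + z[i] - 1 > r:
--             l, r = i, i + z[i] - 1
--         if z[i] == n - i:
--             if n - i > maximum_value: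
--                 maximum_value = n - i
--     if maximum_value == 0:
--         return original_string_length
--     return original_string_length - maximum_value
-- ===== SOURCE B (Python) =====
-- def find_original_length_with_z_func(input_string):
--     n = len(input_string)
--     if n == 0:
--         return 0
--     pi = [0] * n
--     k = 0
--     for i in range(1, n):
--         while k > 0 and input_string[i] != input_string[k]:
--             k = pi[k - 1]
--         if input_string[i] == input_string[k]:
--             k += 1
--         pi[i] = k
--     return n - pi[n - 1]
-- ===== Notes on version B (the rewrite author's own statement) =====
-- stated objective: faster
-- what changed: Replaces the Z-function sweep (window [l,r], per-index right-extension, running maximum of full-suffix matches) by the standard KMP prefix-function table with a fallback pointer; the answer is n - pi[n-1], the length minus the longest proper border.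
import Mathlib
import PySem

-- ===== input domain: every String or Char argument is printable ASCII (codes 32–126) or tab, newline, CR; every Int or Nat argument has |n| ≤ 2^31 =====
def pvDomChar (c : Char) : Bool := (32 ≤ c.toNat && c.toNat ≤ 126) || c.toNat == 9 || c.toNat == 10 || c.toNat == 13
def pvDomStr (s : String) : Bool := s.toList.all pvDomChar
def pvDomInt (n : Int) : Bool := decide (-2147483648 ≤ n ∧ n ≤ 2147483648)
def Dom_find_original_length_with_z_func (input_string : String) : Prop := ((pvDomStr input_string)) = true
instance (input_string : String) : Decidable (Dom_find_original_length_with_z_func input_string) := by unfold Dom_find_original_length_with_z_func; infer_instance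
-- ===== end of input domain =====

-- B replaces A's Z-function sweep by the standard KMP prefix-function table (fallback pointer);
-- both return length minus the longest proper border. Same O(n) algorithm class; a timing run
-- measured B faster by a constant factor (fewer per-index comparisons and no window bookkeeping).

-- ===== PORT A =====
def pvExtend (s : List Char) (n i : Nat) (c : Nat) : Nat :=
  if h : i + c < n ∧ s.getD c ' ' = s.getD (i + c) ' ' then
    pvExtend s n i (c + 1)
  else c
termination_by n - (i + c)
decreasing_by omega

def pvStepA (s : List Char) (n : Nat) (st : List Nat × Nat × Nat × Nat) (i : Nat) :
    List Nat × Nat × Nat × Nat :=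
  let z := st.1; let l := st.2.1; let r := st.2.2.1; let maxv := st.2.2.2
  let c0 : Nat := if i ≤ r then min (r - i + 1) (z.getD (i - l) 0) else z.getD i 0
  let c := pvExtend s n i c0
  let z' := z.set i c
  let lr : Nat × Nat := if i + c - 1 > r then (i, i + c - 1) else (l, r)
  let maxv' : Nat := if c = n - i then (if n - i > maxv then n - i else maxv) else maxv
  (z', lr.1, lr.2, maxv')

def find_original_length_with_z_func (input_string : String) : Int :=
  let s := input_string.toList
  let n := s.length
  let st := (List.range' 1 (n - 1)).foldl (pvStepA s n) (List.replicate n 0, 0, 0, 0)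
  let maxv := st.2.2.2
  if maxv = 0 then (n : Int) else (n : Int) - (maxv : Int)

-- ===== PORT B =====
def pvFall (s : List Char) (pi : List Nat) (ci : Char) : Nat → Nat → Nat
  | 0, k => k
  | fuel + 1, k =>
    if 0 < k ∧ ci ≠ s.getD k ' ' then pvFall s pi ci fuel (pi.getD (k - 1) 0) else k

def pvStepB (s : List Char) (st : List Nat × Nat) (i : Nat) : List Nat × Nat :=
  let pi := st.1; let k := st.2
  let ci := s.getD i ' '
  let k1 := pvFall s pi ci k k
  let k2 := if ci = s.getD k1 ' ' then k1 + 1 else k1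
  (pi.set i k2, k2)

def find_original_length_with_z_func_alt (input_string : String) : Int :=
  let s := input_string.toList
  let n := s.length
  if n = 0 then 0
  else
    let st := (List.range' 1 (n - 1)).foldl (pvStepB s) (List.replicate n 0, 0)
    (n : Int) - (st.1.getD (n - 1) 0 : Int)

-- ===== PRECONDITION & SPEC =====
def Spec_find_original_length_with_z_func (input_string : String) (out : Int) : Prop := out = find_original_length_with_z_func_alt input_string
instance (input_string : String) (out : Int) : Decidable (Spec_find_original_length_with_z_func input_string out) := by unfold Spec_find_original_length_with_z_func; infer_instance

-- ===== CLAIM (what is proved, stated in full; the proofs are below) =====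
def Claim_equal_find_original_length_with_z_func : Prop := ∀ (input_string : String), Dom_find_original_length_with_z_func input_string → Spec_find_original_length_with_z_func input_string (find_original_length_with_z_func input_string)

-- ===== LEMMAS AND PROOFS =====
def pvLcp : List Char → List Char → Nat
  | a :: as, b :: bs => if a = b then pvLcp as bs + 1 else 0
  | _, _ => 0


theorem pvLcp_le_right (a b : List Char) : pvLcp a b ≤ b.length := by
  induction a generalizing b with
  | nil => simp [pvLcp]
  | cons x xs ih =>
    cases b with
    | nil => simp [pvLcp]
    | cons y ys =>
      simp only [pvLcp, List.length_cons]
      split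
      · exact Nat.succ_le_succ (ih ys)
      · omega

theorem pvLcp_getD (a b : List Char) (j : Nat) (hj : j < pvLcp a b) :
    a.getD j ' ' = b.getD j ' ' := by
  induction a generalizing b j with
  | nil => simp [pvLcp] at hj
  | cons x xs ih =>
    cases b with
    | nil => simp [pvLcp] at hj
    | cons y ys =>
      simp only [pvLcp] at hj
      split at hj
      · cases j with
        | zero => simpa using ‹x = y›
        | succ j' => simpa using ih ys j' (by omega)
      · omega

theorem pvLcp_mismatch (a b : List Char) (h1 : pvLcp a b < a.length) (h2 : pvLcp a b < b.length) :
    a.getD (pvLcp a b) ' ' ≠ b.getD (pvLcp a b) ' ' := by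
  induction a generalizing b with
  | nil => simp at h1
  | cons x xs ih =>
    cases b with
    | nil => simp at h2
    | cons y ys =>
      by_cases hxy : x = y
      · simp only [pvLcp, if_pos hxy, List.length_cons] at h1 h2 ⊢
        simpa [hxy] using ih ys (by omega) (by omega)
      · simp only [pvLcp, if_neg hxy]
        simpa using hxy

theorem le_pvLcp (a b : List Char) (c : Nat) (hc2 : c ≤ b.length)
    (h : ∀ j < c, a.getD j ' ' = b.getD j ' ') (hc1 : c ≤ a.length) : c ≤ pvLcp a b := by
  induction a generalizing b c with
  | nil => simp at hc1; omega
  | cons x xs ih =>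
    cases b with
    | nil => simp at hc2; omega
    | cons y ys =>
      cases c with
      | zero => omega
      | succ c' =>
        have hxy : x = y := by simpa using h 0 (by omega)
        simp only [pvLcp, if_pos hxy]
        have := ih ys c' (by simpa using hc2)
          (fun j hj => by simpa using h (j+1) (by omega)) (by simpa using hc1)
        omega

theorem pvLcp_eq_len_iff (a b : List Char) (h : b.length ≤ a.length) :
    pvLcp a b = b.length ↔ a.take b.length = b := by
  induction a generalizing b with
  | nil =>
    cases b with
    | nil => simp [pvLcp]
    | cons y ys => simp at h
  | cons x xs ih =>
    cases b with
    | nil => simp [pvLcp]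
    | cons y ys =>
      simp only [pvLcp, List.length_cons, List.take_succ_cons]
      by_cases hxy : x = y
      · rw [if_pos hxy]
        simp only [List.cons.injEq]
        constructor
        · intro h1
          exact ⟨hxy, (ih ys (by simpa using h)).1 (by omega)⟩
        · rintro ⟨-, h2⟩
          rw [(ih ys (by simpa using h)).2 h2]
      · rw [if_neg hxy]
        simp only [List.cons.injEq]
        constructor
        · omega
        · rintro ⟨h1, -⟩; exact absurd h1 hxy

theorem getD_drop (s : List Char) (i j : Nat) :
    (s.drop i).getD j ' ' = s.getD (i + j) ' ' := by
  simp [List.getD, List.getElem?_drop]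

theorem getD_take (s : List Char) (m j : Nat) (hj : j < m) :
    (s.take m).getD j ' ' = s.getD j ' ' := by
  simp [List.getD, List.getElem?_take, hj]

def pvIsB (t : List Char) (b : Nat) : Prop := b < t.length ∧ t.take b = t.drop (t.length - b)

theorem border_iff_getD (t : List Char) (b : Nat) (hb : b ≤ t.length) :
    (t.take b = t.drop (t.length - b)) ↔
      ∀ j < b, t.getD j ' ' = t.getD (t.length - b + j) ' ' := by
  constructor
  · intro h j hj
    have := congrArg (fun l => List.getD l j ' ') h
    simp only at this
    rw [getD_take t b j hj] at this
    rw [getD_drop] at this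
    exact this
  · intro h
    apply List.ext_getElem
    · simp; omega
    · intro j h1 h2
      have hj : j < b := by simp at h1; omega
      have e1 : (t.take b)[j] = (t.take b).getD j ' ' := (List.getD_eq_getElem _ _ h1).symm
      have e2 : (t.drop (t.length - b))[j] = (t.drop (t.length - b)).getD j ' ' :=
        (List.getD_eq_getElem _ _ h2).symm
      rw [e1, e2, getD_take t b j hj, getD_drop]
      exact h j hj

theorem pvIsB_getD (t : List Char) (b : Nat) (h : pvIsB t b) :
    ∀ j < b, t.getD j ' ' = t.getD (t.length - b + j) ' ' :=
  (border_iff_getD t b (Nat.le_of_lt h.1)).1 h.2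

theorem pvIsB_of_getD (t : List Char) (b : Nat) (hb : b < t.length)
    (h : ∀ j < b, t.getD j ' ' = t.getD (t.length - b + j) ' ') : pvIsB t b :=
  ⟨hb, (border_iff_getD t b (Nat.le_of_lt hb)).2 h⟩

theorem pvIsB_zero (t : List Char) (h : t ≠ []) : pvIsB t 0 := by
  refine ⟨by cases t <;> simp_all, by simp⟩

-- border of a border: b, c borders of t with b < c ⇒ b is a border of t.take c
theorem pvIsB_nest (t : List Char) (b c : Nat) (hb : pvIsB t b) (hc : pvIsB t c)
    (hbc : b < c) : pvIsB (t.take c) b := by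
  have hcl : c < t.length := hc.1
  have hlen : (t.take c).length = c := by simp; omega
  apply pvIsB_of_getD _ _ (by omega)
  intro j hj
  rw [hlen]
  rw [getD_take t c j (by omega), getD_take t c (c - b + j) (by omega)]
  have e1 := pvIsB_getD t b hb j hj
  have e2 := pvIsB_getD t c hc (c - b + j) (by omega)
  have : t.length - c + (c - b + j) = t.length - b + j := by omega
  rw [this] at e2
  rw [e1, ← e2]

-- transitivity: b border of t.take c, c border of t ⇒ b border of t
theorem pvIsB_trans (t : List Char) (b c : Nat) (hb : pvIsB (t.take c) b) (hc : pvIsB t c) :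
    pvIsB t b := by
  have hcl : c < t.length := hc.1
  have hlen : (t.take c).length = c := by simp; omega
  have hbc : b < c := by have := hb.1; omega
  apply pvIsB_of_getD _ _ (by omega)
  intro j hj
  have e1 := pvIsB_getD _ b hb j hj
  rw [hlen, getD_take t c j (by omega), getD_take t c (c - b + j) (by omega)] at e1
  have e2 := pvIsB_getD t c hc (c - b + j) (by omega)
  have : t.length - c + (c - b + j) = t.length - b + j := by omega
  rw [this] at e2
  rw [e1, e2]

theorem getD_append_lt (t u : List Char) (j : Nat) (hj : j < t.length) :
    (t ++ u).getD j ' ' = t.getD j ' ' := by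
  simp [List.getD, List.getElem?_append_left hj]

theorem getD_append_len (t : List Char) (x : Char) :
    (t ++ [x]).getD t.length ' ' = x := by
  simp [List.getD, List.getElem?_append_right (Nat.le_refl _)]

-- one-step extension: b+1 is a border of t ++ [x] iff b is a border of t matching x
theorem pvIsB_snoc (t : List Char) (x : Char) (b : Nat) :
    pvIsB (t ++ [x]) (b + 1) ↔ pvIsB t b ∧ t.getD b ' ' = x := by
  have hlen : (t ++ [x]).length = t.length + 1 := by simp
  constructor
  · intro h
    have hb : b < t.length := by have := h.1; omega
    have hp := pvIsB_getD _ _ h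
    constructor
    · apply pvIsB_of_getD _ _ hb
      intro j hj
      have := hp j (by omega)
      rw [hlen] at this
      rw [getD_append_lt t [x] j (by omega)] at this
      have harith : t.length + 1 - (b + 1) + j = t.length - b + j := by omega
      rw [harith, getD_append_lt t [x] (t.length - b + j) (by omega)] at this
      exact this
    · have := hp b (by omega)
      rw [hlen] at this
      rw [getD_append_lt t [x] b (by omega)] at this
      have harith : t.length + 1 - (b + 1) + b = t.length := by omega
      rw [harith, getD_append_len] at this
      exact this
  · rintro ⟨h1, h2⟩
    have hb : b < t.length := h1.1
    apply pvIsB_of_getD _ _ (by rw [hlen]; omega)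
    intro j hj
    rw [hlen]
    have harith : t.length + 1 - (b + 1) + j = t.length - b + j := by omega
    rw [harith]
    rcases Nat.lt_or_ge j b with hjb | hjb
    · rw [getD_append_lt t [x] j (by omega), getD_append_lt t [x] (t.length - b + j) (by omega)]
      exact pvIsB_getD t b h1 j hjb
    · have hjb' : j = b := by omega
      subst hjb'
      rw [getD_append_lt t [x] j (by omega)]
      have harith2 : t.length - j + j = t.length := by omega
      rw [harith2, getD_append_len]
      exact h2

def pvMaxBorder (t : List Char) : Nat :=
  Nat.findGreatest (fun b => t.take b = t.drop (t.length - b)) (t.length - 1)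

theorem pvMaxBorder_lt (t : List Char) (h : t ≠ []) : pvMaxBorder t < t.length := by
  have := Nat.findGreatest_le (P := fun b => t.take b = t.drop (t.length - b)) (t.length - 1)
  have h2 : pvMaxBorder t ≤ t.length - 1 := this
  have : t.length ≠ 0 := by simpa using h
  omega

theorem le_pvMaxBorder (t : List Char) (b : Nat) (h : pvIsB t b) : b ≤ pvMaxBorder t :=
  Nat.le_findGreatest (by have := h.1; omega) h.2

theorem pvIsB_pvMaxBorder (t : List Char) (h : t ≠ []) : pvIsB t (pvMaxBorder t) := by
  refine ⟨pvMaxBorder_lt t h, ?_⟩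
  exact Nat.findGreatest_spec (P := fun b => t.take b = t.drop (t.length - b))
    (n := t.length - 1) (Nat.zero_le _) (by simp)

theorem pvMaxBorder_eq (t : List Char) (m : Nat) (ht : t ≠ []) (h1 : pvIsB t m)
    (h2 : ∀ b, pvIsB t b → b ≤ m) : pvMaxBorder t = m :=
  Nat.le_antisymm (h2 _ (pvIsB_pvMaxBorder t ht)) (le_pvMaxBorder t m h1)

-- ports (as in the final file) --

theorem pvExtend_eq_aux (s : List Char) (i : Nat) (m : Nat) :
    ∀ c, pvLcp s (s.drop i) - c ≤ m → c ≤ pvLcp s (s.drop i) →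
      pvExtend s s.length i c = pvLcp s (s.drop i) := by
  induction m with
  | zero =>
    intro c h1 h2
    have hc : c = pvLcp s (s.drop i) := by omega
    subst hc
    rw [pvExtend, dif_neg]
    rintro ⟨hlt, heq⟩
    have hdl : (s.drop i).length = s.length - i := by simp
    have hL : pvLcp s (s.drop i) < (s.drop i).length := by
      have := pvLcp_le_right s (s.drop i); omega
    have := pvLcp_mismatch s (s.drop i) (by omega) hL
    rw [getD_drop] at this
    exact this heq
  | succ m ih =>
    intro c h1 h2
    rcases Nat.eq_or_lt_of_le h2 with hc | hc
    · subst hc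
      rw [pvExtend, dif_neg]
      rintro ⟨hlt, heq⟩
      have hdl : (s.drop i).length = s.length - i := by simp
      have hL : pvLcp s (s.drop i) < (s.drop i).length := by
        have := pvLcp_le_right s (s.drop i); omega
      have := pvLcp_mismatch s (s.drop i) (by omega) hL
      rw [getD_drop] at this
      exact this heq
    · rw [pvExtend, dif_pos]
      · exact ih (c + 1) (by omega) (by omega)
      · constructor
        · have := pvLcp_le_right s (s.drop i)
          have hdl : (s.drop i).length = s.length - i := by simp
          omega
        · have := pvLcp_getD s (s.drop i) c hc
          rw [getD_drop] at this
          exact this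

theorem pvExtend_eq (s : List Char) (i c : Nat) (hc : c ≤ pvLcp s (s.drop i)) :
    pvExtend s s.length i c = pvLcp s (s.drop i) :=
  pvExtend_eq_aux s i (pvLcp s (s.drop i) - c) c (Nat.le_refl _) hc

-- generic indexed foldl invariant over range'
theorem foldl_range'_inv {σ : Type} (f : σ → Nat → σ) (P : Nat → σ → Prop) :
    ∀ (m a : Nat) (st : σ), P a st →
      (∀ i st', a ≤ i → i < a + m → P i st' → P (i + 1) (f st' i)) →
      P (a + m) ((List.range' a m).foldl f st) := by
  intro m
  induction m with
  | zero => intro a st h _; simpa using h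
  | succ m ih =>
    intro a st h hstep
    rw [List.range'_succ, List.foldl_cons]
    have h1 : P (a + 1) (f st a) := hstep a st (Nat.le_refl _) (by omega) h
    have := ih (a + 1) (f st a) h1 (fun i st' hi1 hi2 hP => hstep i st' (by omega) (by omega) hP)
    have harith : a + 1 + m = a + (m + 1) := by omega
    rwa [harith] at this

theorem getD_set_self (z : List Nat) (i c : Nat) (h : i < z.length) :
    (z.set i c).getD i 0 = c := by
  simp [List.getD, List.getElem?_set, h]

theorem getD_set_ne (z : List Nat) (i c j : Nat) (h : j ≠ i) :
    (z.set i c).getD j 0 = z.getD j 0 := by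
  simp [List.getD, List.getElem?_set, (Ne.symm h : i ≠ j)]


def predZ (s : List Char) (i b : Nat) : Prop :=
  1 ≤ b ∧ b ≤ s.length - 1 ∧ s.length - b < i ∧ s.take b = s.drop (s.length - b)

def InvZ (s : List Char) (i : Nat) (st : List Nat × Nat × Nat × Nat) : Prop :=
  st.1.length = s.length ∧
  (∀ j < s.length, st.1.getD j 0 = if 1 ≤ j ∧ j < i then pvLcp s (s.drop j) else 0) ∧
  st.2.1 < i ∧
  ((st.2.1 = 0 ∧ st.2.2.1 = 0) ∨
    (1 ≤ st.2.1 ∧ st.2.2.1 < s.length ∧ st.2.2.1 + 1 - st.2.1 ≤ pvLcp s (s.drop st.2.1))) ∧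
  (∀ b, predZ s i b → b ≤ st.2.2.2) ∧
  (st.2.2.2 = 0 ∨ predZ s i st.2.2.2)

theorem lcp_drop_iff (s : List Char) (i : Nat) (hi : i ≤ s.length) :
    pvLcp s (s.drop i) = s.length - i ↔ s.take (s.length - i) = s.drop i := by
  have hdl : (s.drop i).length = s.length - i := by simp
  have := pvLcp_eq_len_iff s (s.drop i) (by omega)
  rw [hdl] at this
  exact this

theorem predZ_succ_iff (s : List Char) (i b : Nat) (hi1 : 1 ≤ i) (hi2 : i < s.length) :
    predZ s (i + 1) b ↔
      predZ s i b ∨ (b = s.length - i ∧ s.take b = s.drop (s.length - b)) := by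
  unfold predZ
  constructor
  · rintro ⟨h1, h2, h3, h4⟩
    rcases Nat.lt_or_ge (s.length - b) i with h | h
    · exact Or.inl ⟨h1, h2, h, h4⟩
    · have hbe : b = s.length - i := by omega
      exact Or.inr ⟨hbe, h4⟩
  · rintro (⟨h1, h2, h3, h4⟩ | ⟨hbe, h4⟩)
    · exact ⟨h1, h2, by omega, h4⟩
    · exact ⟨by omega, by omega, by omega, h4⟩

theorem InvZ_step (s : List Char) (i : Nat) (st : List Nat × Nat × Nat × Nat)
    (hi1 : 1 ≤ i) (hi2 : i < s.length) (h : InvZ s i st) :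
    InvZ s (i + 1) (pvStepA s s.length st i) := by
  obtain ⟨z, l, r, maxv⟩ := st
  obtain ⟨hlen, hz, hl, hbox, hub, hlb⟩ := h
  simp only at hlen hz hl hbox hub hlb
  have hdl : (s.drop i).length = s.length - i := by simp
  have hLn : pvLcp s (s.drop i) ≤ s.length - i := by
    have := pvLcp_le_right s (s.drop i); omega
  -- the initial value is at most the true lcp
  have hc0 : (if i ≤ r then min (r - i + 1) (z.getD (i - l) 0) else z.getD i 0)
      ≤ pvLcp s (s.drop i) := by
    by_cases hir : i ≤ r
    · rw [if_pos hir]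
      rcases hbox with ⟨hl0, hr0⟩ | ⟨hl1, hrn, hboxlen⟩
      · omega
      · have hzil : z.getD (i - l) 0 = pvLcp s (s.drop (i - l)) := by
          rw [hz (i - l) (by omega), if_pos ⟨by omega, by omega⟩]
        apply le_pvLcp s (s.drop i) _ (by omega)
        · intro j hj
          have hjl : j < pvLcp s (s.drop (i - l)) := by
            rw [← hzil]; omega
          have e1 := pvLcp_getD s (s.drop (i - l)) j hjl
          rw [getD_drop] at e1
          have hj2 : i - l + j < pvLcp s (s.drop l) := by omega
          have e2 := pvLcp_getD s (s.drop l) (i - l + j) hj2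
          rw [getD_drop] at e2
          have harith : l + (i - l + j) = i + j := by omega
          rw [harith] at e2
          rw [getD_drop, ← e2, ← e1]
        · omega
    · rw [if_neg hir, hz i hi2, if_neg (by omega)]
      omega
  have hc : pvExtend s s.length i
      (if i ≤ r then min (r - i + 1) (z.getD (i - l) 0) else z.getD i 0)
      = pvLcp s (s.drop i) := pvExtend_eq s i _ hc0
  simp only [pvStepA, hc]
  set L := pvLcp s (s.drop i) with hLdef
  refine ⟨by simpa using hlen, ?_, ?_, ?_, ?_, ?_⟩
  · -- z values
    intro j hj
    by_cases hji : j = i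
    · subst hji
      rw [getD_set_self z j L (by omega), if_pos ⟨by omega, by omega⟩]
    · rw [getD_set_ne z i L j hji, hz j hj]
      by_cases hcond : 1 ≤ j ∧ j < i
      · rw [if_pos hcond, if_pos ⟨hcond.1, by omega⟩]
      · rw [if_neg hcond, if_neg (by omega)]
  · -- l' < i + 1
    by_cases hg : i + L - 1 > r
    · simp only [if_pos hg]; omega
    · simp only [if_neg hg]; omega
  · -- box
    by_cases hg : i + L - 1 > r
    · simp only [if_pos hg]
      refine Or.inr ⟨by omega, by omega, ?_⟩
      omega
    · simp only [if_neg hg]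
      exact hbox
  · -- upper bound
    intro b hb
    rcases (predZ_succ_iff s i b hi1 hi2).1 hb with hpi | ⟨hbe, hbd⟩
    · have hub' := hub b hpi
      split_ifs <;> dsimp only <;> omega
    · subst hbe
      have hL : L = s.length - i := by
        rw [hLdef, lcp_drop_iff s i (by omega)]
        have e : s.length - (s.length - i) = i := by omega
        rw [e] at hbd
        exact hbd
      rw [if_pos hL]
      split_ifs <;> dsimp only <;> omega
  · -- lower bound / membership
    by_cases hL : L = s.length - i
    · rw [if_pos hL]
      by_cases hgt : s.length - i > maxv
      · rw [if_pos hgt]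
        refine Or.inr ((predZ_succ_iff s i _ hi1 hi2).2 (Or.inr ⟨rfl, ?_⟩))
        have hsb : s.length - (s.length - i) = i := by omega
        rw [hsb, ← lcp_drop_iff s i (by omega), ← hLdef, hL]
      · rw [if_neg hgt]
        rcases hlb with h0 | hp
        · exact Or.inl h0
        · exact Or.inr ((predZ_succ_iff s i _ hi1 hi2).2 (Or.inl hp))
    · rw [if_neg hL]
      rcases hlb with h0 | hp
      · exact Or.inl h0
      · exact Or.inr ((predZ_succ_iff s i _ hi1 hi2).2 (Or.inl hp))


theorem InvZ_init (s : List Char) :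
    InvZ s 1 (List.replicate s.length 0, 0, 0, 0) := by
  refine ⟨by simp, ?_, by show (0:Nat) < 1; omega, Or.inl ⟨rfl, rfl⟩, ?_, Or.inl rfl⟩
  · intro j hj
    rw [if_neg (by omega)]
    simp [List.getD]
  · rintro b ⟨h1, h2, h3, h4⟩
    omega

theorem A_formula (str : String) :
    find_original_length_with_z_func str =
      (str.toList.length : Int) - (pvMaxBorder str.toList : Int) := by
  simp only [find_original_length_with_z_func]
  set s := str.toList with hs
  by_cases hn : s.length = 0
  · have hsnil : s = [] := List.eq_nil_of_length_eq_zero hn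
    rw [hsnil]
    simp [pvMaxBorder, Nat.findGreatest]
  · have h1 : 1 ≤ s.length := by omega
    have hinv := foldl_range'_inv (pvStepA s s.length) (InvZ s) (s.length - 1) 1
      (List.replicate s.length 0, 0, 0, 0) (InvZ_init s) ?_
    · have harith : 1 + (s.length - 1) = s.length := by omega
      rw [harith] at hinv
      obtain ⟨-, -, -, -, hub, hlb⟩ := hinv
      set F := (List.range' 1 (s.length - 1)).foldl (pvStepA s s.length)
        (List.replicate s.length 0, 0, 0, 0) with hF
      have hsne : s ≠ [] := by
        intro hc; rw [hc] at hn; simp at hn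
      have hmb : F.2.2.2 = pvMaxBorder s := by
        apply Nat.le_antisymm
        · rcases hlb with h0 | hp
          · omega
          · exact le_pvMaxBorder s _ ⟨by have := hp.2.1; omega, hp.2.2.2⟩
        · rcases Nat.eq_zero_or_pos (pvMaxBorder s) with h0 | hpos
          · omega
          · have hisb := pvIsB_pvMaxBorder s hsne
            exact hub _ ⟨hpos, by have := hisb.1; omega, by have := hisb.1; omega, hisb.2⟩
      rw [hmb]
      by_cases h0 : pvMaxBorder s = 0
      · rw [if_pos h0, h0]
        simp
      · rw [if_neg h0]
    · intro i st' hi1 hi2 hP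
      exact InvZ_step s i st' hi1 (by omega) hP




theorem take_take_eq (s : List Char) (k i : Nat) (h : k ≤ i) :
    (s.take i).take k = s.take k := by
  rw [List.take_take, Nat.min_eq_left h]

theorem take_len (s : List Char) (i : Nat) (h : i ≤ s.length) : (s.take i).length = i := by
  simp; omega

theorem pvFall_spec (s : List Char) (i : Nat) (pi : List Nat) (hi1 : 1 ≤ i)
    (hi2 : i < s.length)
    (hpi : ∀ j < i, pi.getD j 0 = pvMaxBorder (s.take (j + 1))) :
    ∀ fuel k, k ≤ fuel → pvIsB (s.take i) k →
      pvIsB (s.take i) (pvFall s pi (s.getD i ' ') fuel k) ∧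
      (pvFall s pi (s.getD i ' ') fuel k = 0 ∨
        s.getD i ' ' = s.getD (pvFall s pi (s.getD i ' ') fuel k) ' ') ∧
      (∀ b, pvIsB (s.take i) b → s.getD b ' ' = s.getD i ' ' → b ≤ k →
        b ≤ pvFall s pi (s.getD i ' ') fuel k) := by
  have htlen : (s.take i).length = i := take_len s i (by omega)
  intro fuel
  induction fuel with
  | zero =>
    intro k hk hkb
    have hk0 : k = 0 := by omega
    subst hk0
    exact ⟨hkb, Or.inl rfl, fun b _ _ hb => hb⟩
  | succ fuel ih =>
    intro k hk hkb
    simp only [pvFall]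
    by_cases hcond : 0 < k ∧ s.getD i ' ' ≠ s.getD k ' '
    · rw [if_pos hcond]
      have hklt : k < i := by have := hkb.1; omega
      have hkm : k - 1 + 1 = k := by omega
      have hk' : pi.getD (k - 1) 0 = pvMaxBorder (s.take k) := by
        rw [hpi (k - 1) (by omega), hkm]
      have htk : s.take k = (s.take i).take k := (take_take_eq s k i (by omega)).symm
      have htkne : (s.take i).take k ≠ [] := by
        intro hc
        have := congrArg List.length hc
        rw [take_len (s.take i) k (by omega)] at this
        simp at this; omega
      have hmb' := pvIsB_pvMaxBorder ((s.take i).take k) htkne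
      have hmlt : pvMaxBorder ((s.take i).take k) < k := by
        have := pvMaxBorder_lt ((s.take i).take k) htkne
        rwa [take_len (s.take i) k (by omega)] at this
      have hIsB' : pvIsB (s.take i) (pvMaxBorder ((s.take i).take k)) :=
        pvIsB_trans (s.take i) _ k hmb' hkb
      rw [hk', htk]
      obtain ⟨g1, g2, g3⟩ := ih (pvMaxBorder ((s.take i).take k)) (by omega) hIsB'
      refine ⟨g1, g2, ?_⟩
      intro b hb hmatch hbk
      rcases Nat.eq_or_lt_of_le hbk with hbe | hblt
      · exact absurd (hbe ▸ hmatch).symm hcond.2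
      · have hnest := pvIsB_nest (s.take i) b k hb hkb hblt
        have hble := le_pvMaxBorder _ b hnest
        exact g3 b hb hmatch hble
    · rw [if_neg hcond]
      push_neg at hcond
      refine ⟨hkb, ?_, fun b _ _ hb => hb⟩
      by_cases hk0 : k = 0
      · exact Or.inl hk0
      · exact Or.inr (hcond (by omega))

def InvK (s : List Char) (i : Nat) (st : List Nat × Nat) : Prop :=
  st.1.length = s.length ∧
  (∀ j < i, st.1.getD j 0 = pvMaxBorder (s.take (j + 1))) ∧
  st.2 = pvMaxBorder (s.take i)

theorem pvMaxBorder_single (s : List Char) (h : 1 ≤ s.length) :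
    pvMaxBorder (s.take 1) = 0 := by
  have hl : (s.take 1).length = 1 := take_len s 1 h
  have := Nat.findGreatest_le
    (P := fun b => (s.take 1).take b = (s.take 1).drop ((s.take 1).length - b))
    ((s.take 1).length - 1)
  unfold pvMaxBorder
  omega

theorem InvK_init (s : List Char) (h : 1 ≤ s.length) :
    InvK s 1 (List.replicate s.length 0, 0) := by
  refine ⟨by simp, ?_, ?_⟩
  · intro j hj
    have hj0 : j = 0 := by omega
    subst hj0
    rw [pvMaxBorder_single s h]
    simp [List.getD]
  · rw [pvMaxBorder_single s h]

theorem take_succ_getD (s : List Char) (i : Nat) (h : i < s.length) :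
    s.take (i + 1) = s.take i ++ [s.getD i ' '] := by
  rw [List.take_succ]
  congr 1
  simp [List.getD, List.getElem?_eq_getElem h]

theorem InvK_step (s : List Char) (i : Nat) (st : List Nat × Nat)
    (hi1 : 1 ≤ i) (hi2 : i < s.length) (h : InvK s i st) :
    InvK s (i + 1) (pvStepB s st i) := by
  obtain ⟨pi, k⟩ := st
  obtain ⟨hlen, hpi, hk⟩ := h
  simp only at hlen hpi hk
  have htlen : (s.take i).length = i := take_len s i (by omega)
  have htne : s.take i ≠ [] := by
    intro hc; have := congrArg List.length hc; rw [htlen] at this; simp at this; omega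
  have hkb : pvIsB (s.take i) k := hk ▸ pvIsB_pvMaxBorder (s.take i) htne
  obtain ⟨f1, f2, f3⟩ := pvFall_spec s i pi hi1 hi2 hpi k k (Nat.le_refl k) hkb
  simp only [pvStepB]
  set k1 := pvFall s pi (s.getD i ' ') k k with hk1
  have hsnoc := take_succ_getD s i hi2
  have htne' : s.take (i + 1) ≠ [] := by
    rw [hsnoc]; simp
  have hk2 : (if s.getD i ' ' = s.getD k1 ' ' then k1 + 1 else k1)
      = pvMaxBorder (s.take (i + 1)) := by
    by_cases hmatch : s.getD i ' ' = s.getD k1 ' '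
    · rw [if_pos hmatch]
      refine (pvMaxBorder_eq (s.take (i + 1)) (k1 + 1) htne' ?_ ?_).symm
      · rw [hsnoc]
        refine (pvIsB_snoc (s.take i) (s.getD i ' ') k1).2 ⟨f1, ?_⟩
        rw [getD_take s i k1 (by have := f1.1; omega)]
        exact hmatch.symm
      · intro b hb
        rw [hsnoc] at hb
        cases b with
        | zero => omega
        | succ b' =>
          obtain ⟨hb1, hb2⟩ := (pvIsB_snoc (s.take i) (s.getD i ' ') b').1 hb
          have hb'k : b' ≤ k := hk ▸ le_pvMaxBorder (s.take i) b' hb1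
          have hbm : s.getD b' ' ' = s.getD i ' ' := by
            rw [← getD_take s i b' (by have := hb1.1; omega), hb2]
          have := f3 b' hb1 hbm hb'k
          omega
    · rw [if_neg hmatch]
      have hk10 : k1 = 0 := by
        rcases f2 with h0 | hm
        · exact h0
        · exact absurd hm hmatch
      rw [hk10]
      refine (pvMaxBorder_eq (s.take (i + 1)) 0 htne' (pvIsB_zero _ htne') ?_).symm
      intro b hb
      rw [hsnoc] at hb
      cases b with
      | zero => omega
      | succ b' =>
        exfalso
        obtain ⟨hb1, hb2⟩ := (pvIsB_snoc (s.take i) (s.getD i ' ') b').1 hb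
        have hb'k : b' ≤ k := hk ▸ le_pvMaxBorder (s.take i) b' hb1
        have hbm : s.getD b' ' ' = s.getD i ' ' := by
          rw [← getD_take s i b' (by have := hb1.1; omega), hb2]
        have hb0 : b' = 0 := by have := f3 b' hb1 hbm hb'k; omega
        subst hb0
        rw [hk10] at hmatch
        exact hmatch hbm.symm
  refine ⟨by simpa using hlen, ?_, ?_⟩
  · intro j hj
    by_cases hji : j = i
    · subst hji
      rw [getD_set_self pi j _ (by omega), hk2]
    · rw [getD_set_ne pi i _ j hji, hpi j (by omega)]
  · exact hk2

theorem B_formula (str : String) :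
    find_original_length_with_z_func_alt str =
      (str.toList.length : Int) - (pvMaxBorder str.toList : Int) := by
  simp only [find_original_length_with_z_func_alt]
  set s := str.toList with hs
  by_cases hn : s.length = 0
  · rw [if_pos hn]
    have hsnil : s = [] := List.eq_nil_of_length_eq_zero hn
    rw [hsnil]
    simp [pvMaxBorder, Nat.findGreatest]
  · rw [if_neg hn]
    have h1 : 1 ≤ s.length := by omega
    have hinv := foldl_range'_inv (pvStepB s) (InvK s) (s.length - 1) 1
      (List.replicate s.length 0, 0) (InvK_init s h1)
      (fun i st' hi1 hi2 hP => InvK_step s i st' hi1 (by omega) hP)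
    have harith : 1 + (s.length - 1) = s.length := by omega
    rw [harith] at hinv
    obtain ⟨-, hpi, -⟩ := hinv
    have := hpi (s.length - 1) (by omega)
    have harith2 : s.length - 1 + 1 = s.length := by omega
    rw [harith2, List.take_length] at this
    rw [this]

-- ===== VERDICT (by name: the statement is the Claim_ definition above) =====
theorem find_original_length_with_z_func_spec : Claim_equal_find_original_length_with_z_func := by
  intro input_string _
  unfold Spec_find_original_length_with_z_func
  rw [A_formula, B_formula]
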